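-- pv_equiv track=rewrite | github.com/buz321/-_- | 프로그래머스/unrated/181887. 홀수 vs 짝수/홀수 vs 짝수.py | solution
-- ===== SOURCE A (Python) =====
-- def solution(num_list):
--     answer = 0
--     hol = 0
--     jjack = 0
--     for i in range(len(num_list)):
--         if i % 2 == 1:
--             hol += num_list[i]
--         else:
--             jjack += num_list[i]
--
--     if hol > jjack:
--         return hol
--     else:
--         return jjack
-- ===== SOURCE B (Python) =====
-- def solution(num_list):
--     return max(sum(num_list[::2]), sum(num_list[1::2]))
-- ===== Notes on version B (the rewrite author's own statement) =====
-- stated objective: simpler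
-- what changed: Replaces the indexed loop with a parity branch and two accumulators by two stride-2 slices summed independently and combined with max.
import Mathlib
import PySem

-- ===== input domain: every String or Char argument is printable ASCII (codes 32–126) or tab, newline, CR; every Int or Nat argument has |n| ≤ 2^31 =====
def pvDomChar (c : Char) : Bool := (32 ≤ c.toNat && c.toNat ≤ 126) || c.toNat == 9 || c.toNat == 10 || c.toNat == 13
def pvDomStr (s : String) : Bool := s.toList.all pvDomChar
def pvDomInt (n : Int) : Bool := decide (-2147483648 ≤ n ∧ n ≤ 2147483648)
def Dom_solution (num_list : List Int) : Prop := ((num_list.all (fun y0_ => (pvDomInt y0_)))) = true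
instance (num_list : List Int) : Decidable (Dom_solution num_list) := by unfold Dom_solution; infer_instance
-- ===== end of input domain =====

-- B replaces A's single indexed loop with a parity branch by two stride-2 slices summed separately and combined with max (objective: simpler).


-- ===== PORT A =====
-- for i in range(len(num_list)): parity branch accumulating hol (odd indices) / jjack (even indices)
def solution (num_list : List Int) : Int :=
  let p :=
    (PySem.List.pyRange 0 (num_list.length : Int) 1).foldl
      (fun (s : Int × Int) i =>
        if PySem.Int.mod i 2 = 1 then (s.1 + PySem.List.pyGetD num_list i 0, s.2)
        else (s.1, s.2 + PySem.List.pyGetD num_list i 0))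
      (0, 0)
  if p.1 > p.2 then p.1 else p.2

-- ===== PORT B =====
-- hand port of the stride-2 slice xs[::2] (exact: elements at indices 0,2,4,…)
def pvEvery2 : List Int → List Int
  | [] => []
  | [a] => [a]
  | a :: _ :: t => a :: pvEvery2 t

-- max(sum(num_list[::2]), sum(num_list[1::2])); num_list[1::2] = (tail)[::2], exact
def solution_alt (num_list : List Int) : Int :=
  max (pvEvery2 num_list).sum (pvEvery2 num_list.tail).sum

-- ===== PRECONDITION & SPEC =====
def Spec_solution (num_list : List Int) (out : Int) : Prop := out = solution_alt num_list
instance (num_list : List Int) (out : Int) : Decidable (Spec_solution num_list out) := by unfold Spec_solution; infer_instance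

-- ===== CLAIM (what is proved, stated in full; the proofs are below) =====
def Claim_equal_solution : Prop := ∀ (num_list : List Int), Dom_solution num_list → Spec_solution num_list (solution num_list)

-- ===== LEMMAS AND PROOFS =====

-- sum of even-index elements
def pvE (l : List Int) : Int := (pvEvery2 l).sum
-- sum of odd-index elements
def pvO (l : List Int) : Int := (pvEvery2 l.tail).sum

lemma pvEvery2_append_singleton (l : List Int) (x : Int) :
    pvEvery2 (l ++ [x]) = pvEvery2 l ++ (if l.length % 2 = 0 then [x] else []) := by
  induction l using pvEvery2.induct with
  | case1 => simp [pvEvery2]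
  | case2 a => simp [pvEvery2]
  | case3 a b t ih =>
    have h2 : (t.length + 1 + 1) % 2 = t.length % 2 := by omega
    simp [pvEvery2, ih, h2]

lemma pvE_append_singleton (l : List Int) (x : Int) :
    pvE (l ++ [x]) = pvE l + (if l.length % 2 = 0 then x else 0) := by
  simp only [pvE, pvEvery2_append_singleton]
  split <;> simp

lemma pvO_append_singleton (l : List Int) (x : Int) :
    pvO (l ++ [x]) = pvO l + (if l.length % 2 = 1 then x else 0) := by
  cases l with
  | nil => simp [pvO, pvEvery2]
  | cons a t =>
    simp only [pvO, List.cons_append, List.tail_cons, pvEvery2_append_singleton,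
      List.length_cons]
    rcases Nat.even_or_odd t.length with h | h
    · have h0 : t.length % 2 = 0 := Nat.even_iff.mp h
      simp [h0, Nat.succ_mod_two_eq_one_iff.mpr h0]
    · have h1 : t.length % 2 = 1 := Nat.odd_iff.mp h
      simp [h1, Nat.succ_mod_two_eq_zero_iff.mpr h1]

lemma pv_fold_take (xs : List Int) (n : Nat) (hn : n ≤ xs.length) :
    (PySem.List.pyRange 0 (n : Int) 1).foldl
      (fun (s : Int × Int) i =>
        if PySem.Int.mod i 2 = 1 then (s.1 + PySem.List.pyGetD xs i 0, s.2)
        else (s.1, s.2 + PySem.List.pyGetD xs i 0))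
      (0, 0) = (pvO (xs.take n), pvE (xs.take n)) := by
  induction n with
  | zero => simp [PySem.List.pyRange_one_eq_nil, pvO, pvE, pvEvery2]
  | succ n ih =>
    have hn' : n ≤ xs.length := Nat.le_of_succ_le hn
    have hlt : n < xs.length := hn
    have hsplit : PySem.List.pyRange 0 ((n : Int) + 1) 1
        = PySem.List.pyRange 0 (n : Int) 1 ++ [(n : Int)] :=
      PySem.List.pyRange_one_succ_right (by exact_mod_cast Nat.zero_le n)
    have hcast : ((n + 1 : Nat) : Int) = (n : Int) + 1 := by push_cast; ring
    rw [hcast, hsplit, List.foldl_append, ih hn']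
    have hget : PySem.List.pyGetD xs ((n : Nat) : Int) 0 = xs[n] := by
      rw [PySem.List.pyGetD_natCast]
      exact List.getD_eq_getElem xs 0 hlt
    have htake : xs.take (n + 1) = xs.take n ++ [xs[n]] := by
      rw [List.take_add_one]
      simp [List.getElem?_eq_getElem hlt]
    have hlen : (xs.take n).length = n := List.length_take_of_le hn'
    have hmod : PySem.Int.mod ((n : Nat) : Int) 2 = ((n % 2 : Nat) : Int) := by
      simp [PySem.Int.mod, Int.fmod_eq_emod]
    rw [htake, pvO_append_singleton, pvE_append_singleton, hlen]
    simp only [List.foldl_cons, List.foldl_nil, hget, hmod]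
    rcases Nat.even_or_odd n with h | h
    · have h0 : n % 2 = 0 := Nat.even_iff.mp h
      simp [h0]
    · have h1 : n % 2 = 1 := Nat.odd_iff.mp h
      simp [h1]

-- ===== VERDICT (by name: the statement is the Claim_ definition above) =====
theorem solution_spec : Claim_equal_solution := by
  intro xs _
  show solution xs = solution_alt xs
  unfold solution solution_alt
  rw [pv_fold_take xs xs.length le_rfl, List.take_length]
  simp only [pvO, pvE]
  omega
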